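-- pv_equiv track=rewrite | github.com/broadinstitute/str-analysis | str_analysis/utils/find_repeat_unit.py | find_repeat_unit_without_allowing_interruptions
-- ===== SOURCE A (Python) =====
-- def find_repeat_unit_without_allowing_interruptions(sequence, allow_partial_repeats=False):
--     """Check whether the given nucleotide sequence entirely consists of repeats of some smaller repeat unit
--     (eg. CAGCAGCAGCAGCAG = 5xCAG). If no such repeat unit is found, return the input sequence itself.
--
--     Args:
--         sequence (str): nucleotide sequence
--         allow_partial_repeats (bool): If False, partial repeats will not be allowed. For example, an input sequence of
--             "CAGCAGCA" would not be counted as having repeat unit "CAG" repeats because the last repeat is incomplete.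
--             If True, "CAGCAGCA" would be counted as consisting of 2 "CAG" repeats.
--
--     Return:
--          3-tuple (str, int, bool):
--             repeat unit,
--             number of pure repeats,
--             has_partial_repeats
--     """
--
--     # find the smallest repeat unit that covers the entire sequence
--     repeat_unit_length = 1
--     while repeat_unit_length <= len(sequence)/2:
--         if not allow_partial_repeats and len(sequence) % repeat_unit_length != 0:
--             repeat_unit_length += 1
--             continue
--
--         repeat_unit = sequence[:repeat_unit_length]
--         num_repeats = sequence.count(repeat_unit)
--         if num_repeats * repeat_unit_length == len(sequence):
--             return repeat_unit, num_repeats, False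
--
--         if allow_partial_repeats:
--             partial_repeat_length = len(sequence) % repeat_unit_length
--             if num_repeats * repeat_unit_length == len(sequence) - partial_repeat_length \
--                     and sequence[num_repeats * repeat_unit_length:] == repeat_unit[:partial_repeat_length]:
--                 return repeat_unit, num_repeats, True
--
--         repeat_unit_length += 1
--
--     # no repeat unit found, so return the input sequence itself as the repeat unit
--     return sequence, 1, False
-- ===== SOURCE B (Python) =====
-- def find_repeat_unit_without_allowing_interruptions(sequence, allow_partial_repeats=False):
--     n = len(sequence)
--     # smallest period of the sequence: least k >= 1 with sequence[k:] == sequence[:n-k]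
--     p = n
--     for k in range(1, n):
--         if sequence[k:] == sequence[:n - k]:
--             p = k
--             break
--     if p and 2 * p <= n and (allow_partial_repeats or n % p == 0):
--         return sequence[:p], n // p, n % p != 0
--     return sequence, 1, False
-- ===== Notes on version B (the rewrite author's own statement) =====
-- stated objective: alternative
-- what changed: Instead of testing every candidate length with a str.count scan, B computes the fundamental (smallest) period of the sequence once via a self-overlap test and derives the answer arithmetically from it; by the Fine-Wilf periodicity lemma any valid repeat-unit length is a multiple of that period, so only the period itself has to be examined.
-- intended difference: With allow_partial_repeats=True, on sequences whose smallest unit length passing A's count-based test is not a true period (str.count also matches non-contiguous occurrences of the unit), A returns that unit with a positive pure-repeat count and has_partial_repeats=True although the sequence is not tiled by the unit, while B, judging by actual periodicity, returns the intended value (the sequence itself, or its true period if one exists). — e.g. on find_repeat_unit_without_allowing_interruptions("aacaa", true): A returns ("aa", 2, true), B returns ("aacaa", 1, false)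
import Mathlib
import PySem

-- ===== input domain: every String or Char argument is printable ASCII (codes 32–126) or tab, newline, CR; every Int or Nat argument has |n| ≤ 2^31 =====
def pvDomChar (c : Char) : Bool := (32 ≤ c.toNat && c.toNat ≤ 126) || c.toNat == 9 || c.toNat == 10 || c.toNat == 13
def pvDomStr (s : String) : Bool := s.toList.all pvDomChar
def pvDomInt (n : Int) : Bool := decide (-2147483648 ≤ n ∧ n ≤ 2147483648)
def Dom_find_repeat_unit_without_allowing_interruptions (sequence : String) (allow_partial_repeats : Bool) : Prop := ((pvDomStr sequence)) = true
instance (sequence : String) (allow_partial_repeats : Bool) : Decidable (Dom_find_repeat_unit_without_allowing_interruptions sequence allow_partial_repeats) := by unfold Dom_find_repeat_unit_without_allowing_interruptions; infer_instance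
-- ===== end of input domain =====

-- B replaces A's per-length count-scan by computing the fundamental period once and deriving the
-- answer arithmetically from it; with allow_partial_repeats=True it also fixes A's str.count bug (see D_).

-- ===== PORT A =====
-- Literal port of A's while-loop (fuel = remaining loop iterations, always sufficient at the call
-- site, so the fuel-0 value is never reached). `repeat_unit_length <= len(sequence)/2` on these
-- integers is exactly 2*k ≤ n; the slices sequence[:k], sequence[num*k:], repeat_unit[:r]
-- (nonnegative bounds, clamped) are List.take / List.drop; sequence.count(u) is PySem.Chars.count.
def pvA_loop (sequence : List Char) (allow_partial_repeats : Bool) (fuel repeat_unit_length : Nat) : String × Int × Bool :=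
  match fuel with
  | 0 => (String.ofList sequence, 1, false)
  | fuel + 1 =>
    if 2 * repeat_unit_length ≤ sequence.length then
      if allow_partial_repeats = false ∧ sequence.length % repeat_unit_length ≠ 0 then
        pvA_loop sequence allow_partial_repeats fuel (repeat_unit_length + 1)
      else
        let repeat_unit := sequence.take repeat_unit_length
        let num_repeats := PySem.Chars.count sequence repeat_unit
        if num_repeats * repeat_unit_length = sequence.length then
          (String.ofList repeat_unit, (num_repeats : Int), false)
        else
          let partial_repeat_length := sequence.length % repeat_unit_length
          if allow_partial_repeats = true ∧
              num_repeats * repeat_unit_length = sequence.length - partial_repeat_length ∧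
              sequence.drop (num_repeats * repeat_unit_length) = repeat_unit.take partial_repeat_length then
            (String.ofList repeat_unit, (num_repeats : Int), true)
          else
            pvA_loop sequence allow_partial_repeats fuel (repeat_unit_length + 1)
    else
      (String.ofList sequence, 1, false)

def find_repeat_unit_without_allowing_interruptions (sequence : String) (allow_partial_repeats : Bool) : String × Int × Bool :=
  pvA_loop sequence.toList allow_partial_repeats (sequence.toList.length + 1) 1

-- ===== PORT B =====
-- Literal port of B: the smallest-period scan (`for k in range(1, n): if sequence[k:] == sequence[:n-k]: break`,
-- fueled as above), then the arithmetic epilogue.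
def pvB_period (sequence : List Char) (fuel k : Nat) : Nat :=
  match fuel with
  | 0 => sequence.length
  | fuel + 1 =>
    if k < sequence.length then
      if sequence.drop k = sequence.take (sequence.length - k) then k
      else pvB_period sequence fuel (k + 1)
    else
      sequence.length

def find_repeat_unit_without_allowing_interruptions_alt (sequence : String) (allow_partial_repeats : Bool) : String × Int × Bool :=
  let n := sequence.toList.length
  let p := pvB_period sequence.toList n 1
  if p ≠ 0 ∧ 2 * p ≤ n ∧ (allow_partial_repeats = true ∨ n % p = 0) then
    (String.ofList (sequence.toList.take p), ((n / p : Nat) : Int), decide (n % p ≠ 0))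
  else
    (sequence, 1, false)

-- ===== PRECONDITION & SPEC =====
-- A's count-based acceptance test for one candidate unit length k under allow_partial_repeats=True,
-- stated on the input sequence alone (used only to delimit D_; reaches neither port).
abbrev pvAhit (w : List Char) (k : Nat) : Prop :=
  PySem.Chars.count w (w.take k) = w.length / k ∧
    w.drop (w.length - w.length % k) <+: w

-- With allow_partial_repeats=True, on sequences whose smallest unit length k passing A's
-- count-based test is not a true period (str.count also matches non-contiguous occurrences),
-- A reports k-unit repeats although the sequence is not tiled by its length-k prefix,
-- while B answers from actual periodicity — the intended behaviour.
def D_find_repeat_unit_without_allowing_interruptions (sequence : String) (allow_partial_repeats : Bool) : Prop :=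
  allow_partial_repeats = true ∧
    ∃ k ≤ sequence.toList.length, 1 ≤ k ∧ pvAhit sequence.toList k ∧
      ∀ j ≤ k, 1 ≤ j → ¬ (sequence.toList.drop j <+: sequence.toList)

instance (sequence : String) (allow_partial_repeats : Bool) : Decidable (D_find_repeat_unit_without_allowing_interruptions sequence allow_partial_repeats) := by
  unfold D_find_repeat_unit_without_allowing_interruptions; infer_instance

def Spec_find_repeat_unit_without_allowing_interruptions (sequence : String) (allow_partial_repeats : Bool) (out : String × Int × Bool) : Prop := ¬ D_find_repeat_unit_without_allowing_interruptions sequence allow_partial_repeats → out = find_repeat_unit_without_allowing_interruptions_alt sequence allow_partial_repeats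
instance (sequence : String) (allow_partial_repeats : Bool) (out : String × Int × Bool) : Decidable (Spec_find_repeat_unit_without_allowing_interruptions sequence allow_partial_repeats out) := by unfold Spec_find_repeat_unit_without_allowing_interruptions; infer_instance

def pvDiffWitness_find_repeat_unit_without_allowing_interruptions : String × Bool := ("aacaa", true)
def pvDiffWitnessOut_find_repeat_unit_without_allowing_interruptions : (String × Int × Bool) × (String × Int × Bool) := (("aa", 2, true), ("aacaa", 1, false))

-- ===== CLAIM (what is proved, stated in full; the proofs are below) =====
def Claim_unchanged_find_repeat_unit_without_allowing_interruptions : Prop := ∀ (sequence : String) (allow_partial_repeats : Bool), Dom_find_repeat_unit_without_allowing_interruptions sequence allow_partial_repeats → Spec_find_repeat_unit_without_allowing_interruptions sequence allow_partial_repeats (find_repeat_unit_without_allowing_interruptions sequence allow_partial_repeats)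
def Claim_changed_find_repeat_unit_without_allowing_interruptions : Prop := Dom_find_repeat_unit_without_allowing_interruptions (pvDiffWitness_find_repeat_unit_without_allowing_interruptions.1) (pvDiffWitness_find_repeat_unit_without_allowing_interruptions.2) ∧ D_find_repeat_unit_without_allowing_interruptions (pvDiffWitness_find_repeat_unit_without_allowing_interruptions.1) (pvDiffWitness_find_repeat_unit_without_allowing_interruptions.2) ∧ find_repeat_unit_without_allowing_interruptions (pvDiffWitness_find_repeat_unit_without_allowing_interruptions.1) (pvDiffWitness_find_repeat_unit_without_allowing_interruptions.2) = pvDiffWitnessOut_find_repeat_unit_without_allowing_interruptions.1 ∧ find_repeat_unit_without_allowing_interruptions_alt (pvDiffWitness_find_repeat_unit_without_allowing_interruptions.1) (pvDiffWitness_find_repeat_unit_without_allowing_interruptions.2) = pvDiffWitnessOut_find_repeat_unit_without_allowing_interruptions.2 ∧ pvDiffWitnessOut_find_repeat_unit_without_allowing_interruptions.1 ≠ pvDiffWitnessOut_find_repeat_unit_without_allowing_interruptions.2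
def Claim_exact_find_repeat_unit_without_allowing_interruptions : Prop := ∀ (sequence : String) (allow_partial_repeats : Bool), Dom_find_repeat_unit_without_allowing_interruptions sequence allow_partial_repeats → D_find_repeat_unit_without_allowing_interruptions sequence allow_partial_repeats → find_repeat_unit_without_allowing_interruptions sequence allow_partial_repeats ≠ find_repeat_unit_without_allowing_interruptions_alt sequence allow_partial_repeats

-- ===== LEMMAS AND PROOFS =====

-- Mirror of CPython's greedy non-overlapping substring count (what PySem.Chars.count.go computes),
-- without the fuel, for reasoning.
def pvGcount (u l : List Char) : Nat :=
  if hu : u.length = 0 then 0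
  else if hp : u.isPrefixOf l then 1 + pvGcount u (l.drop u.length)
  else
    match l with
    | [] => 0
    | _ :: t => pvGcount u t
termination_by l.length
decreasing_by
  · have hpre := List.isPrefixOf_iff_prefix.mp hp
    have h1 := hpre.length_le
    have h2 : 0 < u.length := Nat.pos_of_ne_zero hu
    simp only [List.length_drop]; omega
  · simp

theorem pvGcount_nil (u : List Char) : pvGcount u [] = 0 := by
  rw [pvGcount]
  cases u <;> simp [List.isPrefixOf]

theorem pvGcount_prefix {u l : List Char} (hu : u ≠ []) (hp : u <+: l) :
    pvGcount u l = 1 + pvGcount u (l.drop u.length) := by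
  rw [pvGcount, dif_neg (by simpa using hu), dif_pos (List.isPrefixOf_iff_prefix.mpr hp)]

theorem pvGcount_cons_not_prefix {u : List Char} {c : Char} {t : List Char}
    (hp : ¬ u <+: (c :: t)) : pvGcount u (c :: t) = pvGcount u t := by
  have hu : ¬ u.length = 0 := by
    intro h
    exact hp (by simp [List.length_eq_zero_iff.mp h])
  rw [pvGcount, dif_neg hu, dif_neg (fun h => hp (List.isPrefixOf_iff_prefix.mp h))]

theorem pvGo_eq_gcount (u : List Char) (hu : u ≠ []) :
    ∀ (fuel : Nat) (l : List Char) (acc : Nat), l.length ≤ fuel →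
      PySem.Chars.count.go u fuel l acc = acc + pvGcount u l := by
  intro fuel
  induction fuel with
  | zero =>
    intro l acc h
    have : l = [] := List.eq_nil_of_length_eq_zero (by omega)
    subst this
    rw [PySem.Chars.count.go, pvGcount_nil]
    omega
  | succ fuel ih =>
    intro l acc h
    cases l with
    | nil =>
      rw [PySem.Chars.count.go, pvGcount_nil]
      · omega
      · omega
    | cons c t =>
      rw [PySem.Chars.count.go]
      have hupos : 0 < u.length := List.length_pos_iff.mpr hu
      by_cases hp : u.isPrefixOf (c :: t)
      · simp only [hp, if_true]
        rw [ih _ _ (by simp only [List.length_drop, List.length_cons]; simp only [List.length_cons] at h; omega)]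
        rw [pvGcount_prefix hu (List.isPrefixOf_iff_prefix.mp hp)]
        omega
      
      · simp only [hp, Bool.false_eq_true, if_false]
        rw [ih _ _ (by simp only [List.length_cons] at h; omega)]
        rw [pvGcount_cons_not_prefix (fun hpre => hp (List.isPrefixOf_iff_prefix.mpr hpre))]

theorem pvCount_eq_gcount (l u : List Char) (hu : u ≠ []) :
    PySem.Chars.count l u = pvGcount u l := by
  rw [PySem.Chars.count]
  rw [if_neg (by simpa [List.isEmpty_iff] using hu)]
  rw [pvGo_eq_gcount u hu l.length l 0 le_rfl, Nat.zero_add]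

theorem pvGcount_short (u l : List Char) (h : l.length < u.length) : pvGcount u l = 0 := by
  induction l with
  | nil => exact pvGcount_nil u
  | cons c t ih =>
    have hp : ¬ u <+: (c :: t) := fun hpre => by
      have := hpre.length_le; omega
    rw [pvGcount_cons_not_prefix hp]
    exact ih (by simp at h ⊢; omega)

theorem pvGcount_le (u : List Char) (hu : u ≠ []) :
    ∀ l : List Char, pvGcount u l * u.length ≤ l.length := by
  have hupos : 0 < u.length := List.length_pos_iff.mpr hu
  intro l
  induction hn : l.length using Nat.strong_induction_on generalizing l with
  | _ n ih =>
    subst hn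
    by_cases hp : u <+: l
    · rw [pvGcount_prefix hu hp]
      have hle := hp.length_le
      have := ih (l.drop u.length).length (by simp; omega) (l.drop u.length) rfl
      simp only [List.length_drop] at this
      calc (1 + pvGcount u (l.drop u.length)) * u.length
          = u.length + pvGcount u (l.drop u.length) * u.length := by ring
        _ ≤ u.length + (l.length - u.length) := by omega
        _ ≤ l.length := by omega
    · cases l with
      | nil => rw [pvGcount_nil]; simp
      | cons c t =>
        rw [pvGcount_cons_not_prefix hp]
        have := ih t.length (by simp) t rfl
        simp only [List.length_cons]
        omega

theorem pvGcount_tiled (u : List Char) (hu : u ≠ []) (m : Nat) (s : List Char)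
    (hs : s.length < u.length) : pvGcount u ((List.replicate m u).flatten ++ s) = m := by
  induction m with
  | zero => simpa using pvGcount_short u s hs
  | succ m ih =>
    rw [List.replicate_succ, List.flatten_cons, List.append_assoc]
    rw [pvGcount_prefix hu (List.prefix_append u _), List.drop_left]
    rw [ih]
    omega

theorem pvGcount_max (u l : List Char) (hu : u ≠ [])
    (h : pvGcount u l * u.length = l.length) :
    l = (List.replicate (pvGcount u l) u).flatten := by
  have hupos : 0 < u.length := List.length_pos_iff.mpr hu
  induction hn : l.length using Nat.strong_induction_on generalizing l with
  | _ n ih =>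
    subst hn
    by_cases hp : u <+: l
    · rw [pvGcount_prefix hu hp] at h ⊢
      have hdrop : (l.drop u.length).length = l.length - u.length := by simp
      have hle := hp.length_le
      rw [Nat.add_mul, Nat.one_mul] at h
      have hrec : pvGcount u (l.drop u.length) * u.length = (l.drop u.length).length := by
        rw [hdrop]; omega
      have htail := ih (l.drop u.length).length (by rw [hdrop]; omega) (l.drop u.length) hrec rfl
      rw [Nat.add_comm 1 _, List.replicate_succ, List.flatten_cons, ← htail]
      exact (List.prefix_iff_eq_append.mp hp).symm
    · cases l with
      | nil => rw [pvGcount_nil]; simp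
      | cons c t =>
        rw [pvGcount_cons_not_prefix hp] at h ⊢
        have := pvGcount_le u hu t
        simp only [List.length_cons] at h
        omega

-- the self-overlap test IS List.HasPeriod
theorem pvPeriod_iff (w : List Char) (k : Nat) : (w.drop k <+: w) ↔ List.HasPeriod w k := by
  constructor
  · intro h
    have h2 : w.take k ++ w.drop k <+: w.take k ++ w := (List.prefix_append_right_inj _).mpr h
    rw [List.take_append_drop] at h2
    rw [List.HasPeriod]; exact h2
  · intro h
    rw [List.HasPeriod] at h
    have h2 : w.take k ++ w.drop k <+: w.take k ++ w := by rw [List.take_append_drop]; exact h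
    exact (List.prefix_append_right_inj _).mp h2

theorem pvPeriod_eq_iff (w : List Char) (k : Nat) :
    (w.drop k = w.take (w.length - k)) ↔ (w.drop k <+: w) := by
  rw [List.prefix_iff_eq_take, List.length_drop]

-- structure of a k-periodic list: q full copies of the unit plus a prefix of it
theorem pvPeriodic_structure (w : List Char) (k : Nat) (hk : 0 < k)
    (hper : w.drop k <+: w) :
    w = (List.replicate (w.length / k) (w.take k)).flatten ++ (w.take k).take (w.length % k) := by
  induction hn : w.length using Nat.strong_induction_on generalizing w with
  | _ n ih =>
    subst hn
    by_cases hkn : k ≤ w.length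
    · have hdiv : w.length / k = (w.length - k) / k + 1 := Nat.div_eq_sub_div hk hkn
      have hmod : w.length % k = (w.length - k) % k := Nat.mod_eq_sub_mod hkn
      have hw' : (w.drop k).length = w.length - k := by simp
      have hperW : List.HasPeriod w k := (pvPeriod_iff w k).mp hper
      have hper' : (w.drop k).drop k <+: w.drop k := by
        apply (pvPeriod_iff _ k).mpr
        have hfac : List.HasPeriod (w.take k ++ w.drop k ++ []) k := by
          rw [List.append_nil, List.take_append_drop]
          exact hperW
        exact hfac.factor
      have hIH := ih (w.drop k).length (by rw [hw']; omega) (w.drop k) hper' rfl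
      by_cases h2 : 2 * k ≤ w.length
      · have htk : (w.drop k).take k = w.take k := by
          obtain ⟨t, ht⟩ := hper
          conv_rhs => rw [← ht]
          rw [List.take_append_of_le_length (by rw [hw']; omega)]
        rw [htk, hw'] at hIH
        conv_lhs => rw [← List.take_append_drop k w]
        rw [hdiv, hmod, List.replicate_succ, List.flatten_cons, List.append_assoc, ← hIH]
      · have hq : w.length / k = 1 := by
          rw [hdiv, Nat.div_eq_of_lt (by omega)]
        have hr : w.length % k = w.length - k := by
          rw [hmod, Nat.mod_eq_of_lt (by omega)]
        have hdropeq : w.drop k = w.take (w.length - k) := (pvPeriod_eq_iff w k).mpr hper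
        rw [hq, hr, List.take_take, min_eq_left (by omega)]
        conv_lhs => rw [← List.take_append_drop k w]
        rw [hdropeq]
        simp
    · have hq : w.length / k = 0 := Nat.div_eq_of_lt (by omega)
      have hr : w.length % k = w.length := Nat.mod_eq_of_lt (by omega)
      rw [hq, hr, List.take_take, min_eq_left (by omega)]
      simp

theorem pvTiled_period (u : List Char) (hu : u ≠ []) (m : Nat) :
    ((List.replicate m u).flatten).drop u.length <+: (List.replicate m u).flatten := by
  cases m with
  | zero => simp
  | succ m =>
    have h1 : (List.replicate (m + 1) u).flatten = u ++ (List.replicate m u).flatten := by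
      rw [List.replicate_succ, List.flatten_cons]
    have h2 : (List.replicate (m + 1) u).flatten = (List.replicate m u).flatten ++ u := by
      rw [List.replicate_succ', List.flatten_append]
      simp
    have h3 : ((List.replicate (m + 1) u).flatten).drop u.length = (List.replicate m u).flatten := by
      rw [h1, List.drop_left]
    rw [h3, h2]
    exact List.prefix_append _ _

theorem pvCount_of_period (w : List Char) (k : Nat) (hk : 0 < k) (hkn : k ≤ w.length)
    (hper : w.drop k <+: w) :
    PySem.Chars.count w (w.take k) = w.length / k := by
  have hlu : (w.take k).length = k := by simp [hkn]
  have hu : w.take k ≠ [] := by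
    intro h
    rw [h] at hlu
    simp at hlu
    omega
  rw [pvCount_eq_gcount w (w.take k) hu]
  have hS := pvPeriodic_structure w k hk hper
  have hstep := congrArg (pvGcount (w.take k)) hS
  rw [hstep]
  exact pvGcount_tiled (w.take k) hu _ _ (by
    simp only [List.length_take, hlu]
    have := Nat.mod_lt w.length hk
    omega)

theorem pvTail_of_period (w : List Char) (k : Nat) (hk : 0 < k) (hkn : k ≤ w.length)
    (hper : w.drop k <+: w) :
    w.drop (w.length / k * k) = (w.take k).take (w.length % k) := by
  have hlu : (w.take k).length = k := by simp [hkn]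
  have hS := pvPeriodic_structure w k hk hper
  have hlen : ((List.replicate (w.length / k) (w.take k)).flatten).length = w.length / k * k := by
    simp [List.length_flatten, List.map_replicate, hlu, List.sum_replicate, smul_eq_mul]
  have hstep := congrArg (List.drop (w.length / k * k)) hS
  rw [← hlen, List.drop_left] at hstep
  rw [hlen] at hstep
  exact hstep

theorem pvPeriod_of_count (w : List Char) (k : Nat) (hk : 0 < k) (hkn : k ≤ w.length)
    (h : PySem.Chars.count w (w.take k) * k = w.length) : w.drop k <+: w := by
  have hlu : (w.take k).length = k := by simp [hkn]
  have hu : w.take k ≠ [] := by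
    intro hh
    rw [hh] at hlu
    simp at hlu
    omega
  rw [pvCount_eq_gcount w (w.take k) hu] at h
  have htile := pvGcount_max (w.take k) w hu (by rw [hlu]; exact h)
  have := pvTiled_period (w.take k) hu (pvGcount (w.take k) w)
  rw [← htile, hlu] at this
  exact this

-- A's acceptance test for both modes (helper for the loop characterisation)
abbrev pvHit (w : List Char) (b : Bool) (k : Nat) : Prop :=
  if b then pvAhit w k
  else w.length % k = 0 ∧ PySem.Chars.count w (w.take k) * k = w.length

def pvOut (w : List Char) (k : Nat) : String × Int × Bool :=
  (String.ofList (w.take k), (PySem.Chars.count w (w.take k) : Int),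
    !(PySem.Chars.count w (w.take k) * k == w.length))

theorem pvHit_of_period (w : List Char) (b : Bool) (k : Nat) (hk : 0 < k)
    (h2 : 2 * k ≤ w.length) (hper : w.drop k <+: w)
    (hdvd : b = false → w.length % k = 0) : pvHit w b k := by
  have hkn : k ≤ w.length := by omega
  have hq := pvCount_of_period w k hk hkn hper
  have hdm := Nat.div_add_mod' w.length k
  cases b with
  | false =>
    have hr := hdvd rfl
    exact ⟨hr, by rw [hq]; omega⟩
  | true =>
    refine ⟨hq, ?_⟩
    have h1 : w.length / k * k = w.length - w.length % k := by omega
    have h2' := pvTail_of_period w k hk hkn hper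
    rw [h1] at h2'
    rw [h2', List.take_take]
    exact List.take_prefix _ _

theorem pvDvd_of_count (w : List Char) (k : Nat) (hk1 : 1 ≤ k) (hkn : k ≤ w.length)
    (hq : PySem.Chars.count w (w.take k) * k = w.length) : w.length % k = 0 := by
  have hlu : (w.take k).length = k := by simp [hkn]
  have hu : w.take k ≠ [] := by
    intro h
    rw [h] at hlu
    simp at hlu
    omega
  rw [pvCount_eq_gcount w _ hu] at hq
  have htile := pvGcount_max (w.take k) w hu (by rw [hlu]; exact hq)
  have hlen := congrArg List.length htile
  simp only [List.length_flatten, List.map_replicate, hlu, List.sum_replicate, smul_eq_mul] at hlen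
  rw [hlen, Nat.mul_mod_left]

theorem pvHit_branch1 {w : List Char} {b : Bool} {k : Nat} (hk1 : 1 ≤ k) (hkn : k ≤ w.length)
    (hc : ¬(b = false ∧ w.length % k ≠ 0))
    (hq : PySem.Chars.count w (w.take k) * k = w.length) : pvHit w b k := by
  have hr : w.length % k = 0 := by
    cases b with
    | true => exact pvDvd_of_count w k hk1 hkn hq
    | false =>
      by_contra h
      exact hc ⟨rfl, h⟩
  cases b with
  | true =>
    refine ⟨by rw [← hq, Nat.mul_div_cancel _ (by omega : 0 < k)], ?_⟩
    rw [hr, Nat.sub_zero, List.drop_length]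
    exact List.nil_prefix
  | false => exact ⟨hr, hq⟩

theorem pvHit_branch2 {w : List Char} {k : Nat} (hk1 : 1 ≤ k)
    (hq2 : PySem.Chars.count w (w.take k) * k = w.length - w.length % k)
    (ht : w.drop (PySem.Chars.count w (w.take k) * k) = (w.take k).take (w.length % k)) :
    pvHit w true k := by
  have hdm := Nat.div_add_mod' w.length k
  have h1 : w.length / k * k = w.length - w.length % k := by omega
  have hmul : PySem.Chars.count w (w.take k) * k = w.length / k * k := by rw [hq2, h1]
  have hcnt : PySem.Chars.count w (w.take k) = w.length / k :=
    Nat.eq_of_mul_eq_mul_right (show 0 < k by omega) hmul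
  refine ⟨hcnt, ?_⟩
  rw [← hq2, ht, List.take_take]
  exact List.take_prefix _ _

theorem pvA_step_skip (w : List Char) (b : Bool) (fuel k : Nat) (hk1 : 1 ≤ k) (h2 : 2 * k ≤ w.length)
    (hfalse : ¬ pvHit w b k) :
    pvA_loop w b (fuel + 1) k = pvA_loop w b fuel (k + 1) := by
  rw [pvA_loop]
  dsimp only
  rw [if_pos h2]
  by_cases hc : b = false ∧ w.length % k ≠ 0
  · rw [if_pos hc]
  · rw [if_neg hc]
    have h3 : ¬ (PySem.Chars.count w (w.take k) * k = w.length) :=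
      fun h3 => hfalse (pvHit_branch1 hk1 (by omega) hc h3)
    rw [if_neg h3]
    have h4 : ¬ (b = true ∧ PySem.Chars.count w (w.take k) * k = w.length - w.length % k ∧
        w.drop (PySem.Chars.count w (w.take k) * k) = (w.take k).take (w.length % k)) := by
      rintro ⟨hb, hq2, ht⟩
      subst hb
      exact hfalse (pvHit_branch2 hk1 hq2 ht)
    rw [if_neg h4]

theorem pvA_step_hit (w : List Char) (b : Bool) (fuel k : Nat) (hk1 : 1 ≤ k)
    (h2 : 2 * k ≤ w.length) (htrue : pvHit w b k) :
    pvA_loop w b (fuel + 1) k = pvOut w k := by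
  have hc : ¬(b = false ∧ w.length % k ≠ 0) := by
    rintro ⟨hb, hr⟩
    subst hb
    simp only [pvHit, Bool.false_eq_true, if_false] at htrue
    exact hr htrue.1
  rw [pvA_loop]
  dsimp only
  rw [if_pos h2, if_neg hc]
  by_cases h3 : PySem.Chars.count w (w.take k) * k = w.length
  · rw [if_pos h3]
    simp [pvOut, h3]
  · rw [if_neg h3]
    have h4 : b = true ∧ PySem.Chars.count w (w.take k) * k = w.length - w.length % k ∧
        w.drop (PySem.Chars.count w (w.take k) * k) = (w.take k).take (w.length % k) := by
      cases b with
      | false =>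
        simp only [pvHit, Bool.false_eq_true, if_false] at htrue
        exact absurd htrue.2 h3
      | true =>
        simp only [pvHit, if_true] at htrue
        obtain ⟨hcnt, hpre⟩ := htrue
        have hdm := Nat.div_add_mod' w.length k
        have hq2 : PySem.Chars.count w (w.take k) * k = w.length - w.length % k := by
          rw [hcnt]
          omega
        refine ⟨rfl, hq2, ?_⟩
        rw [hq2]
        have hlen : (w.drop (w.length - w.length % k)).length = w.length % k := by
          rw [List.length_drop]
          have := Nat.mod_le w.length k
          omega
        have heq := List.prefix_iff_eq_take.mp hpre
        rw [hlen] at heq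
        rw [heq, List.take_take,
          Nat.min_eq_left (Nat.le_of_lt (Nat.mod_lt _ (by omega)))]
    rw [if_pos h4]
    simp [pvOut, h3]

theorem pvA_loop_none (w : List Char) (b : Bool) :
    ∀ (fuel k : Nat), 1 ≤ k → w.length + 1 - k ≤ fuel →
      (∀ j, k ≤ j → 2 * j ≤ w.length → ¬ pvHit w b j) →
      pvA_loop w b fuel k = (String.ofList w, 1, false) := by
  intro fuel
  induction fuel with
  | zero => intro k _ _ _; rw [pvA_loop]
  | succ fuel ih =>
    intro k hk1 hf hnone
    by_cases h2 : 2 * k ≤ w.length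
    · rw [pvA_step_skip w b fuel k hk1 h2 (hnone k le_rfl h2)]
      exact ih (k + 1) (by omega) (by omega) (fun j hj => hnone j (by omega))
    · rw [pvA_loop, if_neg h2]

theorem pvA_loop_hit (w : List Char) (b : Bool) (k0 : Nat)
    (h2 : 2 * k0 ≤ w.length) (hhit : pvHit w b k0) :
    ∀ (fuel k : Nat), 1 ≤ k → w.length + 1 - k ≤ fuel → k ≤ k0 →
      (∀ j, k ≤ j → j < k0 → ¬ pvHit w b j) →
      pvA_loop w b fuel k = pvOut w k0 := by
  intro fuel
  induction fuel with
  | zero => intro k _ hf hk _; omega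
  | succ fuel ih =>
    intro k hk1 hf hk hmin
    have h2k : 2 * k ≤ w.length := by omega
    by_cases hkk : k = k0
    · subst hkk
      exact pvA_step_hit w b fuel k hk1 h2k hhit
    · rw [pvA_step_skip w b fuel k hk1 h2k (hmin k le_rfl (by omega))]
      exact ih (k + 1) (by omega) (by omega) (by omega) (fun j hj hj' => hmin j (by omega) hj')

theorem pvB_period_none (w : List Char) :
    ∀ (fuel k : Nat), w.length - k ≤ fuel →
      (∀ j, k ≤ j → j < w.length → ¬(w.drop j = w.take (w.length - j))) →
      pvB_period w fuel k = w.length := by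
  intro fuel
  induction fuel with
  | zero => intro k _ _; rw [pvB_period]
  | succ fuel ih =>
    intro k hf hnone
    rw [pvB_period]
    split_ifs with h1 heq
    · exact absurd heq (hnone k le_rfl h1)
    · exact ih (k + 1) (by omega) (fun j hj => hnone j (by omega))
    · rfl

theorem pvB_period_hit (w : List Char) (p : Nat) (hp : p < w.length)
    (hper : w.drop p = w.take (w.length - p)) :
    ∀ (fuel k : Nat), w.length - k ≤ fuel → k ≤ p →
      (∀ j, k ≤ j → j < p → ¬(w.drop j = w.take (w.length - j))) →
      pvB_period w fuel k = p := by
  intro fuel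
  induction fuel with
  | zero => intro k hf hk _; omega
  | succ fuel ih =>
    intro k hf hk hmin
    rw [pvB_period]
    by_cases hkk : k = p
    · subst hkk
      rw [if_pos (by omega), if_pos hper]
    · rw [if_pos (by omega), if_neg (hmin k le_rfl (by omega))]
      exact ih (k + 1) (by omega) (by omega) (fun j hj hj' => hmin j (by omega) hj')

theorem pvB_period_result (w : List Char) :
    ∀ (fuel k : Nat), w.length - k ≤ fuel →
      pvB_period w fuel k = w.length ∨
      (pvB_period w fuel k < w.length ∧
        w.drop (pvB_period w fuel k) = w.take (w.length - pvB_period w fuel k)) := by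
  intro fuel
  induction fuel with
  | zero => intro k _; left; rw [pvB_period]
  | succ fuel ih =>
    intro k hf
    rw [pvB_period]
    split_ifs with h1 heq
    · exact Or.inr ⟨h1, heq⟩
    · exact ih (k + 1) (by omega)
    · left; rfl

-- ===== VERDICT (by name: the statement is the Claim_ definition above) =====
-- the central equivalence, outside D_
theorem pvMain (sequence : String) (b : Bool)
    (hD : ¬ D_find_repeat_unit_without_allowing_interruptions sequence b) :
    find_repeat_unit_without_allowing_interruptions sequence b =
      find_repeat_unit_without_allowing_interruptions_alt sequence b := by
  simp only [find_repeat_unit_without_allowing_interruptions,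
    find_repeat_unit_without_allowing_interruptions_alt]
  by_cases hn2 : 2 ≤ sequence.toList.length
  · by_cases hhit : ∃ k0, 1 ≤ k0 ∧ 2 * k0 ≤ sequence.toList.length ∧ pvHit sequence.toList b k0
    · -- A stops at the first accepted length k0, which (outside D_) is the fundamental period
      obtain ⟨k0, hk01, hk02, hk0hit, hmin⟩ :
          ∃ k0, 1 ≤ k0 ∧ 2 * k0 ≤ sequence.toList.length ∧ pvHit sequence.toList b k0 ∧
            ∀ j, 1 ≤ j → j < k0 → ¬ pvHit sequence.toList b j := by
        obtain ⟨h1, h2, h3⟩ := Nat.find_spec hhit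
        refine ⟨Nat.find hhit, h1, h2, h3, fun j hj hjlt => ?_⟩
        intro hne
        exact Nat.find_min hhit hjlt ⟨hj, by omega, hne⟩
      have hA := pvA_loop_hit sequence.toList b k0 hk02 hk0hit
        (sequence.toList.length + 1) 1 (by omega) (by omega) hk01 (fun j hj hj' => hmin j hj hj')
      have hper0 : sequence.toList.drop k0 <+: sequence.toList := by
        cases b with
        | false =>
          simp only [pvHit, Bool.false_eq_true, if_false] at hk0hit
          exact pvPeriod_of_count sequence.toList k0 (by omega) (by omega) hk0hit.2
        | true =>
          by_contra hnp
          refine hD ⟨rfl, k0, by omega, hk01, (by simpa [pvHit] using hk0hit), ?_⟩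
          intro j hjle hj1 hPj
          rcases Nat.lt_or_ge j k0 with hlt | hge
          · have hh := pvHit_of_period sequence.toList true j (by omega) (by omega) hPj
              (fun h => absurd h (by simp))
            exact hmin j hj1 hlt hh
          · have hjeq : j = k0 := by omega
            subst hjeq
            exact hnp hPj
      have hnolt : ∀ j, 1 ≤ j → j < k0 → ¬ (sequence.toList.drop j <+: sequence.toList) := by
        intro j h1 hj hpj
        have hex : ∃ m, 1 ≤ m ∧ sequence.toList.drop m <+: sequence.toList := ⟨j, h1, hpj⟩
        obtain ⟨jm, hjm1, hjmper, hjmmin⟩ :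
            ∃ m, 1 ≤ m ∧ (sequence.toList.drop m <+: sequence.toList) ∧
              ∀ m', 1 ≤ m' → (sequence.toList.drop m' <+: sequence.toList) → m ≤ m' := by
          obtain ⟨h1', h2'⟩ := Nat.find_spec hex
          exact ⟨Nat.find hex, h1', h2', fun m' hm1 hm2 => Nat.find_min' hex ⟨hm1, hm2⟩⟩
        have hjmle : jm ≤ j := hjmmin j h1 hpj
        have hjmlt : jm < k0 := by omega
        have hdvd : b = false → sequence.toList.length % jm = 0 := by
          intro hb
          subst hb
          have hk0dvd : sequence.toList.length % k0 = 0 := by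
            simp only [pvHit, Bool.false_eq_true, if_false] at hk0hit
            exact hk0hit.1
          have hP : List.HasPeriod sequence.toList jm := (pvPeriod_iff _ _).mp hjmper
          have hQ : List.HasPeriod sequence.toList k0 := (pvPeriod_iff _ _).mp hper0
          have hg : List.HasPeriod sequence.toList (Nat.gcd jm k0) := hP.gcd hQ (by omega)
          have hgper := (pvPeriod_iff _ _).mpr hg
          have hgpos : 0 < Nat.gcd jm k0 := Nat.gcd_pos_of_pos_left _ (by omega)
          have hgle : Nat.gcd jm k0 ≤ jm := Nat.gcd_le_left _ (by omega)
          have hge : jm ≤ Nat.gcd jm k0 := hjmmin _ hgpos hgper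
          have hgeq : Nat.gcd jm k0 = jm := by omega
          have hdvdk : jm ∣ k0 := hgeq ▸ Nat.gcd_dvd_right _ _
          exact Nat.mod_eq_zero_of_dvd (hdvdk.trans (Nat.dvd_of_mod_eq_zero hk0dvd))
        have hhitjm : pvHit sequence.toList b jm :=
          pvHit_of_period sequence.toList b jm (by omega) (by omega) hjmper hdvd
        exact hmin jm hjm1 hjmlt hhitjm
      have hk0n : k0 < sequence.toList.length := by omega
      have hdropeq : sequence.toList.drop k0 =
          sequence.toList.take (sequence.toList.length - k0) :=
        (pvPeriod_eq_iff _ _).mpr hper0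
      have hB : pvB_period sequence.toList sequence.toList.length 1 = k0 :=
        pvB_period_hit sequence.toList k0 hk0n hdropeq sequence.toList.length 1
          (by omega) hk01
          (fun j hj hj' heq => hnolt j hj hj' ((pvPeriod_eq_iff _ _).mp heq))
      have hcnt : PySem.Chars.count sequence.toList (sequence.toList.take k0) =
          sequence.toList.length / k0 :=
        pvCount_of_period sequence.toList k0 (by omega) (by omega) hper0
      have hguard : k0 ≠ 0 ∧ 2 * k0 ≤ sequence.toList.length ∧
          (b = true ∨ sequence.toList.length % k0 = 0) := by
        refine ⟨by omega, hk02, ?_⟩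
        cases b with
        | true => exact Or.inl rfl
        | false =>
          refine Or.inr ?_
          simp only [pvHit, Bool.false_eq_true, if_false] at hk0hit
          exact hk0hit.1
      rw [hA, hB, if_pos hguard]
      simp only [pvOut, hcnt]
      have hdm := Nat.div_add_mod' sequence.toList.length k0
      by_cases hr : sequence.toList.length % k0 = 0
      · have hx : sequence.toList.length / k0 * k0 = sequence.toList.length := by omega
        simp only [String.length_toList] at hx hr
        simp [hx, hr]
      · have hx : sequence.toList.length / k0 * k0 ≠ sequence.toList.length := by omega
        simp only [String.length_toList] at hx hr
        simp [hx, hr]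
    · -- no accepted length: A falls through; B's period fails the guard
      have hA := pvA_loop_none sequence.toList b (sequence.toList.length + 1) 1 (by omega) (by omega)
        (fun j hj h2j hpj => hhit ⟨j, hj, h2j, hpj⟩)
      rw [hA]
      rw [if_neg ?_, String.ofList_toList]
      rintro ⟨hp0, hp2, hor⟩
      rcases pvB_period_result sequence.toList sequence.toList.length 1 (by omega) with hres | ⟨hlt, heq⟩
      · omega
      · have hper : sequence.toList.drop (pvB_period sequence.toList sequence.toList.length 1) <+: sequence.toList :=
          (pvPeriod_eq_iff _ _).mp heq
        have : pvHit sequence.toList b (pvB_period sequence.toList sequence.toList.length 1) :=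
          pvHit_of_period sequence.toList b _ (by omega) hp2 hper
            (fun hb => by cases hor with
              | inl h => rw [hb] at h; exact absurd h (by simp)
              | inr h => exact h)
        exact hhit ⟨_, by omega, hp2, this⟩
  · -- length 0 or 1: both fall through
    have hA := pvA_loop_none sequence.toList b (sequence.toList.length + 1) 1 (by omega) (by omega)
      (fun j hj h2j => by omega)
    have hB := pvB_period_none sequence.toList sequence.toList.length 1 (by omega)
      (fun j hj hjlt _ => by omega)
    rw [hA, hB, if_neg (by omega), String.ofList_toList]

theorem find_repeat_unit_without_allowing_interruptions_spec : Claim_unchanged_find_repeat_unit_without_allowing_interruptions := by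
  intro sequence b _ hD
  exact pvMain sequence b hD

theorem find_repeat_unit_without_allowing_interruptions_changed : Claim_changed_find_repeat_unit_without_allowing_interruptions := by
  unfold Claim_changed_find_repeat_unit_without_allowing_interruptions; decide

theorem find_repeat_unit_without_allowing_interruptions_tight : Claim_exact_find_repeat_unit_without_allowing_interruptions := by
  intro sequence b _ hD
  obtain ⟨hb, k, hknn, hk1, hAk, hnop⟩ := hD
  subst hb
  -- a witness length k of D_ necessarily satisfies 2*k ≤ n (otherwise its tail
  -- condition already makes k a period, contradicting the no-period clause)
  have hk2 : 2 * k ≤ sequence.toList.length := by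
    by_contra hgt
    have hmod : sequence.toList.length % k = sequence.toList.length - k := by
      rw [Nat.mod_eq_sub_mod hknn, Nat.mod_eq_of_lt (by omega)]
    have hP : sequence.toList.drop k <+: sequence.toList := by
      have hpre := hAk.2
      rw [hmod] at hpre
      have hx : sequence.toList.length - (sequence.toList.length - k) = k := by omega
      rw [hx] at hpre
      exact hpre
    exact hnop k le_rfl hk1 hP
  have hex : ∃ k0, 1 ≤ k0 ∧ 2 * k0 ≤ sequence.toList.length ∧ pvHit sequence.toList true k0 :=
    ⟨k, hk1, hk2, by simpa [pvHit] using hAk⟩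
  obtain ⟨k0, hk01, hk02, hk0hit, hmin, hk0le⟩ :
      ∃ k0, 1 ≤ k0 ∧ 2 * k0 ≤ sequence.toList.length ∧ pvHit sequence.toList true k0 ∧
        (∀ j, 1 ≤ j → j < k0 → ¬ pvHit sequence.toList true j) ∧ k0 ≤ k := by
    obtain ⟨h1, h2, h3⟩ := Nat.find_spec hex
    refine ⟨Nat.find hex, h1, h2, h3, fun j hj hjlt => ?_,
      Nat.find_min' hex ⟨hk1, hk2, by simpa [pvHit] using hAk⟩⟩
    intro hne
    exact Nat.find_min hex hjlt ⟨hj, by omega, hne⟩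
  have hnper : ¬ (sequence.toList.drop k0 <+: sequence.toList) := hnop k0 hk0le hk01
  have hA : find_repeat_unit_without_allowing_interruptions sequence true =
      pvOut sequence.toList k0 := by
    simp only [find_repeat_unit_without_allowing_interruptions]
    exact pvA_loop_hit sequence.toList true k0 hk02 hk0hit
      (sequence.toList.length + 1) 1 (by omega) (by omega) hk01
      (fun j hj hj' => hmin j hj hj')
  intro hEq
  rw [hA] at hEq
  simp only [find_repeat_unit_without_allowing_interruptions_alt] at hEq
  split_ifs at hEq with hg
  · obtain ⟨hp0, hp2, _⟩ := hg
    have hplt : pvB_period sequence.toList sequence.toList.length 1 < sequence.toList.length := by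
      omega
    have hper : sequence.toList.drop (pvB_period sequence.toList sequence.toList.length 1) <+: sequence.toList := by
      rcases pvB_period_result sequence.toList sequence.toList.length 1 (by omega) with hres | ⟨_, heq⟩
      · omega
      · exact (pvPeriod_eq_iff _ _).mp heq
    have hpne : pvB_period sequence.toList sequence.toList.length 1 ≠ k0 := by
      intro h
      exact hnper (h ▸ hper)
    have h1 := congrArg (fun t : String × Int × Bool => t.1.toList.length) hEq
    simp only [pvOut, String.toList_ofList, List.length_take] at h1
    rw [Nat.min_eq_left (by omega), Nat.min_eq_left (by omega)] at h1
    exact hpne h1.symm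
  · have h1 := congrArg (fun t : String × Int × Bool => t.1.toList.length) hEq
    simp only [pvOut, String.toList_ofList, List.length_take] at h1
    rw [Nat.min_eq_left (by omega)] at h1
    omega
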